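-- pv_equiv track=rewrite | github.com/Amrita8642/Incidentmind-env | envs/grader.py | _runbook_details
-- ===== SOURCE A (Python) =====
-- from typing import Dict, List, Optional, Set, Tuple
--
-- class ActionType:
--     INVESTIGATE          = "INVESTIGATE"
--     IDENTIFY_ROOT_CAUSE  = "IDENTIFY_ROOT_CAUSE"
--     DISMISS_NOISE        = "DISMISS_NOISE"
--     APPLY_RUNBOOK        = "APPLY_RUNBOOK"
--     RESOLVE              = "RESOLVE"
--     # v2 additions
--     GROUP_ALERTS         = "GROUP_ALERTS"         # {type, alert_ids: List[str], group_label: str}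
--     DEDUPLICATE_ALERT    = "DEDUPLICATE_ALERT"     # {type, alert_id, canonical_id}
--
-- def _runbook_details(gt: Dict, actions: List[Dict]) -> Dict:
--     correct_rbs = set(gt["correct_runbook_ids"])
--     applied = {a["runbook_id"] for a in actions
--                if a.get("type") == ActionType.APPLY_RUNBOOK and a.get("runbook_id")}
--     return {
--         "expected": sorted(correct_rbs),
--         "applied":  sorted(applied),
--         "correct":  sorted(applied & correct_rbs),
--         "missed":   sorted(correct_rbs - applied),
--         "wrong":    sorted(applied - correct_rbs),
--     }
-- ===== SOURCE B (Python) =====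
-- def _runbook_details(gt, actions):
--     correct_rbs = set(gt["correct_runbook_ids"])
--     applied = {a["runbook_id"] for a in actions
--                if a.get("type") == "APPLY_RUNBOOK" and a.get("runbook_id")}
--     ids = sorted(correct_rbs | applied)   # one sort; partition it by membership
--     return {
--         "expected": [rb for rb in ids if rb in correct_rbs],
--         "applied":  [rb for rb in ids if rb in applied],
--         "correct":  [rb for rb in ids if rb in applied and rb in correct_rbs],
--         "missed":   [rb for rb in ids if rb in correct_rbs and rb not in applied],
--         "wrong":    [rb for rb in ids if rb in applied and rb not in correct_rbs],
--     }
-- ===== Notes on version B (the rewrite author's own statement) =====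
-- stated objective: alternative
-- what changed: Instead of sorting five separate set-algebra results (expected, applied, intersection, two differences), B sorts the union once and derives all five lists by filtering the single sorted union on set membership.
import Mathlib
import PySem

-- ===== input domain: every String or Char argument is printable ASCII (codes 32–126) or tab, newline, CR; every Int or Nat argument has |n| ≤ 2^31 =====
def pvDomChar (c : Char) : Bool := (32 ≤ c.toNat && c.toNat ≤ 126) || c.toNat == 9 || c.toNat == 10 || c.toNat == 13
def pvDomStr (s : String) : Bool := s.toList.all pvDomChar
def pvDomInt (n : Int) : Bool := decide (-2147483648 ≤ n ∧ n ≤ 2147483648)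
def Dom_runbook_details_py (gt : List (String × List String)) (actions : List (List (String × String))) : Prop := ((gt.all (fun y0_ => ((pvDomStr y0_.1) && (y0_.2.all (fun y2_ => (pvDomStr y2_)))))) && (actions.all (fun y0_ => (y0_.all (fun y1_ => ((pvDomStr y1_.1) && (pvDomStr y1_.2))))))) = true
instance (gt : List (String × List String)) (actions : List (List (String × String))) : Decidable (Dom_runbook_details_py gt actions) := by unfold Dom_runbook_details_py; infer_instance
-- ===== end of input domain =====

-- B sorts the union of the two sets once and derives all five result lists by
-- filtering that single sorted list on set membership, instead of A's five
-- separate sorts of set-algebra results (objective: alternative decomposition).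

-- ===== PORT A =====
-- the set-comprehension condition/value shared by both Pythons verbatim:
-- a.get("type") == "APPLY_RUNBOOK" and a.get("runbook_id")  →  a["runbook_id"]
def pvApplyRb (a : List (String × String)) : Option String :=
  if ((PySem.Dict.mk a).get? "type" == some "APPLY_RUNBOOK")
      && (((PySem.Dict.mk a).get? "runbook_id").getD "" != "") then
    some (((PySem.Dict.mk a).get? "runbook_id").getD "")
  else none

def runbook_details_py (gt : List (String × List String)) (actions : List (List (String × String))) : List (String × List String) :=
  match (PySem.Dict.mk gt).get? "correct_runbook_ids" with
  | none => []   -- KeyError in Python; excluded by Pre_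
  | some ids =>
    let correct_rbs : PySem.Set String := PySem.Set.ofList ids
    let applied : PySem.Set String := PySem.Set.ofList (actions.filterMap pvApplyRb)
    [("expected", PySem.List.sorted correct_rbs (fun x => x) false),
     ("applied",  PySem.List.sorted applied (fun x => x) false),
     ("correct",  PySem.List.sorted (PySem.Set.inter applied correct_rbs) (fun x => x) false),
     ("missed",   PySem.List.sorted (PySem.Set.diff correct_rbs applied) (fun x => x) false),
     ("wrong",    PySem.List.sorted (PySem.Set.diff applied correct_rbs) (fun x => x) false)]

-- ===== PORT B =====
def runbook_details_py_alt (gt : List (String × List String)) (actions : List (List (String × String))) : List (String × List String) :=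
  match (PySem.Dict.mk gt).get? "correct_runbook_ids" with
  | none => []   -- KeyError in Python; excluded by Pre_
  | some l =>
    let correct_rbs : PySem.Set String := PySem.Set.ofList l
    let applied : PySem.Set String := PySem.Set.ofList (actions.filterMap pvApplyRb)
    let ids := PySem.List.sorted (PySem.Set.union correct_rbs applied) (fun x => x) false
    [("expected", ids.filter (fun rb => PySem.Set.contains correct_rbs rb)),
     ("applied",  ids.filter (fun rb => PySem.Set.contains applied rb)),
     ("correct",  ids.filter (fun rb => PySem.Set.contains applied rb && PySem.Set.contains correct_rbs rb)),
     ("missed",   ids.filter (fun rb => PySem.Set.contains correct_rbs rb && !PySem.Set.contains applied rb)),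
     ("wrong",    ids.filter (fun rb => PySem.Set.contains applied rb && !PySem.Set.contains correct_rbs rb))]

-- ===== PRECONDITION & SPEC =====
-- Pre_ excludes only inputs where gt lacks the key "correct_runbook_ids", on which Python A raises KeyError.
def Pre_runbook_details_py (gt : List (String × List String)) (actions : List (List (String × String))) : Prop :=
  "correct_runbook_ids" ∈ gt.map Prod.fst
instance (gt : List (String × List String)) (actions : List (List (String × String))) : Decidable (Pre_runbook_details_py gt actions) := by unfold Pre_runbook_details_py; infer_instance
def pvWitness_runbook_details_py : (List (String × List String)) × (List (List (String × String))) :=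
  ([("correct_runbook_ids", ["rb1", "rb2"])],
   [[("type", "APPLY_RUNBOOK"), ("runbook_id", "rb2")], [("type", "APPLY_RUNBOOK"), ("runbook_id", "rb9")]])

def Spec_runbook_details_py (gt : List (String × List String)) (actions : List (List (String × String))) (out : List (String × List String)) : Prop := out = runbook_details_py_alt gt actions
instance (gt : List (String × List String)) (actions : List (List (String × String))) (out : List (String × List String)) : Decidable (Spec_runbook_details_py gt actions out) := by unfold Spec_runbook_details_py; infer_instance

-- ===== CLAIM =====
def Claim_equal_runbook_details_py : Prop := ∀ (gt : List (String × List String)) (actions : List (List (String × String))), Dom_runbook_details_py gt actions → Pre_runbook_details_py gt actions → Spec_runbook_details_py gt actions (runbook_details_py gt actions)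

-- ===== LEMMAS AND PROOFS =====
-- sorting a nodup list s that holds exactly the p-elements of a nodup list u
-- equals filtering the sorted u by p
theorem pv_sorted_eq_filter_sorted (s u : List String) (p : String → Bool)
    (hs : s.Nodup) (hu : u.Nodup)
    (hm : ∀ x, x ∈ s ↔ x ∈ u ∧ p x = true) :
    PySem.List.sorted s (fun x => x) false
      = (PySem.List.sorted u (fun x => x) false).filter p := by
  have husort : (PySem.List.sorted u (fun x => x) false).Nodup :=
    (PySem.List.sorted_perm u (fun x => x) false).nodup_iff.mpr hu
  apply PySem.List.sorted_eq_of_perm_of_pairwise_lt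
  · rw [List.perm_ext_iff_of_nodup (husort.filter p) hs]
    intro x
    simp only [List.mem_filter, PySem.List.mem_sorted]
    exact (hm x).symm
  · have hle : (PySem.List.sorted u (fun x => x) false).Pairwise (fun a b => a ≤ b) :=
      PySem.List.sorted_pairwise u (fun x => x)
    have hne : (PySem.List.sorted u (fun x => x) false).Pairwise (fun a b => a ≠ b) :=
      husort
    exact ((hle.and hne).imp (fun h => lt_of_le_of_ne h.1 h.2)).filter p

-- ===== VERDICT =====
theorem runbook_details_py_spec : Claim_equal_runbook_details_py := by
  intro gt actions _ _
  unfold Spec_runbook_details_py runbook_details_py runbook_details_py_alt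
  cases h : (PySem.Dict.mk gt).get? "correct_runbook_ids" with
  | none => rfl
  | some ids =>
    simp only
    set C : PySem.Set String := PySem.Set.ofList ids with hC
    set A : PySem.Set String := PySem.Set.ofList (actions.filterMap pvApplyRb) with hA
    have hCn : C.Nodup := PySem.Set.nodup_ofList ids
    have hAn : A.Nodup := PySem.Set.nodup_ofList _
    have hUn : (PySem.Set.union C A).Nodup := PySem.Set.nodup_union C A hCn
    have e1 := pv_sorted_eq_filter_sorted C (PySem.Set.union C A)
      (fun rb => PySem.Set.contains C rb) hCn hUn (by
        intro x; simp [PySem.Set.mem_union]; tauto)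
    have e2 := pv_sorted_eq_filter_sorted A (PySem.Set.union C A)
      (fun rb => PySem.Set.contains A rb) hAn hUn (by
        intro x; simp [PySem.Set.mem_union]; tauto)
    have e3 := pv_sorted_eq_filter_sorted (PySem.Set.inter A C) (PySem.Set.union C A)
      (fun rb => PySem.Set.contains A rb && PySem.Set.contains C rb)
      (PySem.Set.nodup_inter A C hAn) hUn (by
        intro x; simp [PySem.Set.mem_union, PySem.Set.mem_inter]; tauto)
    have e4 := pv_sorted_eq_filter_sorted (PySem.Set.diff C A) (PySem.Set.union C A)
      (fun rb => PySem.Set.contains C rb && !PySem.Set.contains A rb)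
      (PySem.Set.nodup_diff C A hCn) hUn (by
        intro x; simp [PySem.Set.mem_union, PySem.Set.mem_diff]; tauto)
    have e5 := pv_sorted_eq_filter_sorted (PySem.Set.diff A C) (PySem.Set.union C A)
      (fun rb => PySem.Set.contains A rb && !PySem.Set.contains C rb)
      (PySem.Set.nodup_diff A C hAn) hUn (by
        intro x; simp [PySem.Set.mem_union, PySem.Set.mem_diff]; tauto)
    rw [e1, e2, e3, e4, e5]
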